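-- pv_equiv track=rewrite | github.com/prestondunton/rhythm_regression | vector_matching/generate_sample_matchings.py | generate_true_matching
-- ===== SOURCE A (Python) =====
-- def generate_true_matching(m, t):
--     matching = []
--     for i in range(len(m)):
--         for j in range(len(t)):
--             if m[i] == t[j]:
--                 matching.append((i, j))
--
--     # deletion of notes
--     for i in range(len(m)):
--         if i not in [mi for mi, ti in matching]:
--             matching.append((i, None))
--
--     # insertion of notes
--     for j in range(len(t)):
--         if j not in [ti for mi, ti in matching]:
--             matching.append((None, j))
--
--     matching.sort(key=lambda tup: tup[0] if tup[0] is not None else tup[1])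
--
--     return matching
-- ===== SOURCE B (Python) =====
-- def generate_true_matching(m, t):
--     # Emits the result directly in final (key-sorted, stable) order: for each
--     # index k ascending, first the match pairs (k, j), else the deletion (k, None),
--     # then the insertion (None, k) -- so no sort pass is needed at all.
--     tidx = {}
--     for j, v in enumerate(t):
--         tidx.setdefault(v, []).append(j)
--     mvals = set(m)
--     tvals = set(t)
--     out = []
--     for k in range(max(len(m), len(t))):
--         if k < len(m):
--             if m[k] in tvals:
--                 out += [(k, j) for j in tidx[m[k]]]
--             else:
--                 out.append((k, None))
--         if k < len(t) and t[k] not in mvals: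
--             out.append((None, k))
--     return out
-- ===== Notes on version B (the rewrite author's own statement) =====
-- stated objective: faster
-- what changed: B builds the result directly in final sorted order in one ascending index pass (emitting per index k its match pairs, else the deletion, then the insertion), using a t-value->indices dictionary and membership sets, so A's O(n*m) nested scans, repeated membership rescans and the final sort all disappear.
import Mathlib
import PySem

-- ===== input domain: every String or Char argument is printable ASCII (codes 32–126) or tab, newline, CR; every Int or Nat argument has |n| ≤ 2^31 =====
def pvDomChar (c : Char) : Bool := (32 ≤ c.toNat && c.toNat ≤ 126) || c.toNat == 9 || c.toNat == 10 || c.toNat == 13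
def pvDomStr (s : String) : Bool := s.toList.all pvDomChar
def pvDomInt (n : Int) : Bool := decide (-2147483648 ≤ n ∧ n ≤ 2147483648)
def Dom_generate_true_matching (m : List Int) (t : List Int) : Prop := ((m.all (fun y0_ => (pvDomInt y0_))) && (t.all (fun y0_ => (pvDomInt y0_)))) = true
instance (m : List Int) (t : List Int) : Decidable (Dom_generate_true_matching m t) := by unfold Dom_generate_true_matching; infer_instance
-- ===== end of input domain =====

-- B builds the result directly in final sorted order in one ascending index pass (per index k:
-- its match pairs, else the deletion, then the insertion), via a t-value → indices dictionary
-- and membership sets; A's nested scans, membership rescans and final sort all disappear.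

-- ===== PORT A =====
-- the sort key 'tup[0] if tup[0] is not None else tup[1]': both components are never None together,
-- so the inner .getD 0 default is never consulted on lists A builds
def pvKey (p : Option Int × Option Int) : Int :=
  match p.1 with
  | some i => i
  | none => p.2.getD 0

def generate_true_matching (m : List Int) (t : List Int) : List (Option Int × Option Int) :=
  -- m[i]/t[j]: indices come from range(len(...)), always in range, so the pyGetD default 0 is never consulted
  let matching : List (Option Int × Option Int) :=
    (PySem.List.pyRange 0 m.length 1).foldl (fun acc i =>
      (PySem.List.pyRange 0 t.length 1).foldl (fun acc2 j =>
        if PySem.List.pyGetD m i 0 = PySem.List.pyGetD t j 0 then acc2 ++ [(some i, some j)] else acc2) acc) []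
  let matching :=
    (PySem.List.pyRange 0 m.length 1).foldl (fun acc i =>
      if (some i) ∈ acc.map Prod.fst then acc else acc ++ [((some i : Option Int), (none : Option Int))]) matching
  let matching :=
    (PySem.List.pyRange 0 t.length 1).foldl (fun acc j =>
      if (some j) ∈ acc.map Prod.snd then acc else acc ++ [((none : Option Int), (some j : Option Int))]) matching
  PySem.List.sorted matching pvKey false

-- ===== PORT B =====
def generate_true_matching_alt (m : List Int) (t : List Int) : List (Option Int × Option Int) :=
  let tidx : PySem.Dict Int (List Int) :=
    (PySem.List.enumerate t).foldl (fun d jv => d.insert jv.2 (d.getD jv.2 [] ++ [jv.1])) PySem.Dict.empty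
  let mvals : PySem.Set Int := PySem.Set.ofList m
  let tvals : PySem.Set Int := PySem.Set.ofList t
  (PySem.List.pyRange 0 (max (m.length : Int) (t.length : Int)) 1).foldl (fun out k =>
    let out :=
      if k < (m.length : Int) then
        if tvals.contains (PySem.List.pyGetD m k 0) then
          out ++ (tidx.getD (PySem.List.pyGetD m k 0) []).map
            (fun j => ((some k : Option Int), (some j : Option Int)))
        else out ++ [((some k : Option Int), (none : Option Int))]
      else out
    if k < (t.length : Int) ∧ mvals.contains (PySem.List.pyGetD t k 0) = false then
      out ++ [((none : Option Int), (some k : Option Int))]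
    else out) []

-- ===== PRECONDITION & SPEC =====
def Spec_generate_true_matching (m : List Int) (t : List Int) (out : List (Option Int × Option Int)) : Prop := out = generate_true_matching_alt m t
instance (m : List Int) (t : List Int) (out : List (Option Int × Option Int)) : Decidable (Spec_generate_true_matching m t out) := by unfold Spec_generate_true_matching; infer_instance

-- ===== CLAIM (what is proved, stated in full; the proofs are below) =====
def Claim_equal_generate_true_matching : Prop := ∀ (m : List Int) (t : List Int), Dom_generate_true_matching m t → Spec_generate_true_matching m t (generate_true_matching m t)

-- ===== LEMMAS AND PROOFS =====

-- A's pre-sort list, in closed form (first loop: the match pairs)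
def pvM (m t : List Int) : List (Option Int × Option Int) :=
  (PySem.List.pyRange 0 (m.length : Int) 1).flatMap (fun i =>
    ((PySem.List.pyRange 0 (t.length : Int) 1).filter
      (fun j => decide (PySem.List.pyGetD m i 0 = PySem.List.pyGetD t j 0))).map
      (fun j => ((some i : Option Int), (some j : Option Int))))

def pvD (m t : List Int) : List (Option Int × Option Int) :=
  ((PySem.List.pyRange 0 (m.length : Int) 1).filter
    (fun i => decide ((some i) ∉ (pvM m t).map Prod.fst))).map
    (fun i => ((some i : Option Int), (none : Option Int)))

def pvI (m t : List Int) : List (Option Int × Option Int) :=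
  ((PySem.List.pyRange 0 (t.length : Int) 1).filter
    (fun j => decide ((some j) ∉ (pvM m t ++ pvD m t).map Prod.snd))).map
    (fun j => ((none : Option Int), (some j : Option Int)))

-- the group of key k in L (stable-sort fiber)
def pvG (L : List (Option Int × Option Int)) (k : Int) : List (Option Int × Option Int) :=
  L.filter (fun p => decide (pvKey p = k))

-- the deletion loop: membership is tested against the growing list, but every pair it appends has a
-- first component already scanned (and indices are distinct), so it equals a plain filter
theorem del_loop (l : List Int) (acc : List (Option Int × Option Int)) (hnd : l.Nodup) :
    l.foldl (fun acc i => if (some i) ∈ acc.map Prod.fst then acc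
                          else acc ++ [((some i : Option Int), (none : Option Int))]) acc
      = acc ++ (l.filter (fun i => (some i) ∉ acc.map Prod.fst)).map
          (fun i => ((some i : Option Int), (none : Option Int))) := by
  induction l generalizing acc with
  | nil => simp
  | cons hd tl ih =>
    simp only [List.foldl_cons, List.filter_cons]
    rcases List.nodup_cons.mp hnd with ⟨hhd, htl⟩
    by_cases h : (some hd) ∈ acc.map Prod.fst
    · simp [h, ih _ htl]
    · rw [if_neg h, ih _ htl]
      have hfil : tl.filter (fun i => decide ((some i) ∉ (acc ++ [((some hd : Option Int), (none : Option Int))]).map Prod.fst))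
          = tl.filter (fun i => decide ((some i) ∉ acc.map Prod.fst)) := by
        apply List.filter_congr
        intro x hx
        have : x ≠ hd := fun he => hhd (he ▸ hx)
        simp [this]
      rw [hfil]
      simp [h]

-- the insertion loop, same shape on the second component
theorem ins_loop (l : List Int) (acc : List (Option Int × Option Int)) (hnd : l.Nodup) :
    l.foldl (fun acc j => if (some j) ∈ acc.map Prod.snd then acc
                          else acc ++ [((none : Option Int), (some j : Option Int))]) acc
      = acc ++ (l.filter (fun j => (some j) ∉ acc.map Prod.snd)).map
          (fun j => ((none : Option Int), (some j : Option Int))) := by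
  induction l generalizing acc with
  | nil => simp
  | cons hd tl ih =>
    simp only [List.foldl_cons, List.filter_cons]
    rcases List.nodup_cons.mp hnd with ⟨hhd, htl⟩
    by_cases h : (some hd) ∈ acc.map Prod.snd
    · simp [h, ih _ htl]
    · rw [if_neg h, ih _ htl]
      have hfil : tl.filter (fun j => decide ((some j) ∉ (acc ++ [((none : Option Int), (some hd : Option Int))]).map Prod.snd))
          = tl.filter (fun j => decide ((some j) ∉ acc.map Prod.snd)) := by
        apply List.filter_congr
        intro x hx
        have : x ≠ hd := fun he => hhd (he ▸ hx)
        simp [this]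
      rw [hfil]
      simp [h]

-- A's three loops produce exactly pvM ++ pvD ++ pvI before the sort
theorem a_presort (m t : List Int) :
    generate_true_matching m t = PySem.List.sorted (pvM m t ++ pvD m t ++ pvI m t) pvKey false := by
  unfold generate_true_matching
  simp only []
  have hf : (fun (acc : List (Option Int × Option Int)) (i : Int) =>
      (PySem.List.pyRange 0 (t.length : Int) 1).foldl (fun acc2 j =>
        if PySem.List.pyGetD m i 0 = PySem.List.pyGetD t j 0 then acc2 ++ [(some i, some j)] else acc2) acc)
      = (fun acc i => acc ++ ((PySem.List.pyRange 0 (t.length : Int) 1).filter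
          (fun j => decide (PySem.List.pyGetD m i 0 = PySem.List.pyGetD t j 0))).map
          (fun j => ((some i : Option Int), (some j : Option Int)))) := by
    funext acc i
    exact PySem.List.foldl_append_ite _ _ _ _
  rw [hf, PySem.List.foldl_append_eq_flatMap, List.nil_append,
      del_loop _ _ (PySem.List.nodup_pyRange_one 0 (m.length : Int)),
      ins_loop _ _ (PySem.List.nodup_pyRange_one 0 (t.length : Int))]
  rfl

-- insertBy passes over a prefix it does not go before
theorem insertBy_append {α : Type} (before : α → α → Bool) (x : α) (P S : List α)
    (hP : ∀ p ∈ P, before x p = false) :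
    PySem.List.insertBy before x (P ++ S) = P ++ PySem.List.insertBy before x S := by
  induction P with
  | nil => simp
  | cons p P ih =>
    have hp : before x p = false := hP p (List.mem_cons_self)
    simp [PySem.List.insertBy, hp, ih (fun q hq => hP q (List.mem_cons_of_mem _ hq))]

-- insertBy goes in front of a list it goes before everywhere
theorem insertBy_all_before {α : Type} (before : α → α → Bool) (x : α) (S : List α)
    (hS : ∀ s ∈ S, before x s = true) :
    PySem.List.insertBy before x S = x :: S := by
  cases S with
  | nil => simp [PySem.List.insertBy]
  | cons s S => simp [PySem.List.insertBy, hS s List.mem_cons_self]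

theorem flatMap_ite_single {α β : Type} [DecidableEq α] (l : List α) (hl : l.Nodup) (k : α)
    (h : α → List β) :
    l.flatMap (fun i => if i = k then h i else []) = if k ∈ l then h k else [] := by
  induction l with
  | nil => simp
  | cons a l ih =>
    rcases List.nodup_cons.mp hl with ⟨ha, hl'⟩
    by_cases hak : a = k
    · subst hak
      simp [ha, ih hl']
    · simp [hak, ih hl', Ne.symm hak]

theorem filter_eq_of_nodup {α : Type} [DecidableEq α] (l : List α) (hl : l.Nodup) (k : α) :
    l.filter (fun i => decide (i = k)) = if k ∈ l then [k] else [] := by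
  induction l with
  | nil => simp
  | cons a l ih =>
    rcases List.nodup_cons.mp hl with ⟨ha, hl'⟩
    by_cases hak : a = k
    · subst hak
      simp [ha, ih hl']
    · simp [hak, ih hl', Ne.symm hak]

-- all members of the fiber pvG L k have key k; inserting x into the fiber decomposition
theorem insertBy_flatMap_groups (K : List Int) (hK : K.Pairwise (· < ·))
    (L : List (Option Int × Option Int)) (x : Option Int × Option Int) (hx : pvKey x ∈ K) :
    PySem.List.insertBy (fun a b => decide (pvKey a < pvKey b)) x (K.flatMap (pvG L))
      = K.flatMap (pvG (L ++ [x])) := by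
  induction K with
  | nil => cases hx
  | cons k K ih =>
    rcases List.pairwise_cons.mp hK with ⟨hk, hK'⟩
    have hGk : ∀ p ∈ pvG L k, pvKey p = k := by
      intro p hp
      unfold pvG at hp
      exact of_decide_eq_true (List.mem_filter.mp hp).2
    have hGsplit : ∀ k', pvG (L ++ [x]) k' = pvG L k' ++ (if pvKey x = k' then [x] else []) := by
      intro k'
      unfold pvG
      rw [List.filter_append]
      by_cases h : pvKey x = k' <;> simp [h]
    by_cases hxk : pvKey x = k
    · -- x lands at the end of the first fiber
      have hrest : ∀ s ∈ K.flatMap (pvG L), decide (pvKey x < pvKey s) = true := by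
        intro s hs
        rcases List.mem_flatMap.mp hs with ⟨k', hk', hsk'⟩
        unfold pvG at hsk'
        have : pvKey s = k' := of_decide_eq_true (List.mem_filter.mp hsk').2
        simp [this, hxk ▸ hk k' hk']
      rw [List.flatMap_cons,
          insertBy_append _ _ _ _ (fun p hp => by simp [hGk p hp, hxk]),
          insertBy_all_before _ _ _ hrest]
      have hKsame : K.flatMap (pvG (L ++ [x])) = K.flatMap (pvG L) := by
        apply List.flatMap_congr  -- may not exist; fallback below
        intro k' hk'
        rw [hGsplit k']
        have : pvKey x ≠ k' := by
          have := hk k' hk'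
          omega
        simp [this]
      rw [List.flatMap_cons, hKsame, hGsplit k]
      simp [hxk]
    · -- x's key lies further right
      have hxK : pvKey x ∈ K := by
        cases List.mem_cons.mp hx with
        | inl h => exact absurd h hxk
        | inr h => exact h
      have hkx : k < pvKey x := hk _ hxK
      rw [List.flatMap_cons,
          insertBy_append _ _ _ _ (fun p hp => by
            have := hGk p hp
            simp [this]
            omega),
          ih hK' hxK, List.flatMap_cons, hGsplit k]
      simp [hxk]

-- stable sort = concatenation of fibers over any strictly increasing key cover
theorem sorted_eq_flatMap_groups (K : List Int) (hK : K.Pairwise (· < ·))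
    (L : List (Option Int × Option Int)) (hL : ∀ p ∈ L, pvKey p ∈ K) :
    PySem.List.sorted L pvKey false = K.flatMap (pvG L) := by
  rw [PySem.List.sorted_eq_foldl_insertBy]
  induction L using List.reverseRecOn with
  | nil => simp [pvG]
  | append_singleton L x ih =>
    rw [List.foldl_append, List.foldl_cons, List.foldl_nil,
        ih (fun p hp => hL p (List.mem_append_left _ hp)),
        insertBy_flatMap_groups K hK L x (hL x (List.mem_append_right _ List.mem_cons_self))]

-- the dict built by 'tidx.setdefault(v, []).append(j)' maps v to the indices j with snd = v, in order
theorem tidx_getD (l : List (Int × Int)) (d : PySem.Dict Int (List Int)) (v : Int) :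
    (l.foldl (fun d jv => d.insert jv.2 (d.getD jv.2 [] ++ [jv.1])) d).getD v []
      = d.getD v [] ++ (l.filter (fun jv => jv.2 = v)).map Prod.fst := by
  induction l generalizing d with
  | nil => simp
  | cons hd tl ih =>
    simp only [List.foldl_cons, ih, List.filter_cons]
    by_cases h : hd.2 = v
    · simp [h]
    · simp [h, PySem.Dict.getD_insert, Ne.symm h]

-- membership in a list as existence of an in-range index
theorem mem_iff_pyIdx (xs : List Int) (v : Int) :
    v ∈ xs ↔ ∃ j : Int, (0 ≤ j ∧ j < (xs.length : Int)) ∧ PySem.List.pyGetD xs j 0 = v := by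
  conv_lhs => rw [← PySem.List.map_pyGetD_pyRange_zero (xs := xs) (d := 0)]
  simp [List.mem_map, PySem.List.mem_pyRange_one, and_assoc]

theorem contains_ofList_eq_decide (xs : List Int) (v : Int) :
    (PySem.Set.ofList xs).contains v = decide (v ∈ xs) := by
  rw [Bool.eq_iff_iff]
  simp [PySem.Set.mem_ofList]

-- B's per-index emission, in closed form
def pvTidx (t : List Int) : PySem.Dict Int (List Int) :=
  (PySem.List.enumerate t).foldl (fun d jv => d.insert jv.2 (d.getD jv.2 [] ++ [jv.1])) PySem.Dict.empty

def pvGB (m t : List Int) (k : Int) : List (Option Int × Option Int) :=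
  (if k < (m.length : Int) then
     (if (PySem.Set.ofList t).contains (PySem.List.pyGetD m k 0) then
        ((pvTidx t).getD (PySem.List.pyGetD m k 0) []).map
          (fun j => ((some k : Option Int), (some j : Option Int)))
      else [((some k : Option Int), (none : Option Int))])
   else []) ++
  (if k < (t.length : Int) ∧ (PySem.Set.ofList m).contains (PySem.List.pyGetD t k 0) = false then
     [((none : Option Int), (some k : Option Int))]
   else [])

theorem b_flatMap (m t : List Int) :
    generate_true_matching_alt m t
      = (PySem.List.pyRange 0 (max (m.length : Int) (t.length : Int)) 1).flatMap (pvGB m t) := by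
  unfold generate_true_matching_alt
  simp only []
  have hb : (fun (out : List (Option Int × Option Int)) (k : Int) =>
      if k < (t.length : Int) ∧ (PySem.Set.ofList m).contains (PySem.List.pyGetD t k 0) = false then
        (if k < (m.length : Int) then
            if (PySem.Set.ofList t).contains (PySem.List.pyGetD m k 0) = true then
              out ++ List.map (fun j => ((some k : Option Int), (some j : Option Int)))
                ((List.foldl (fun d jv => d.insert jv.2 (d.getD jv.2 [] ++ [jv.1]))
                    PySem.Dict.empty (PySem.List.enumerate t)).getD (PySem.List.pyGetD m k 0) [])
            else out ++ [((some k : Option Int), (none : Option Int))]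
          else out) ++ [((none : Option Int), (some k : Option Int))]
      else
        if k < (m.length : Int) then
          if (PySem.Set.ofList t).contains (PySem.List.pyGetD m k 0) = true then
            out ++ List.map (fun j => ((some k : Option Int), (some j : Option Int)))
              ((List.foldl (fun d jv => d.insert jv.2 (d.getD jv.2 [] ++ [jv.1]))
                  PySem.Dict.empty (PySem.List.enumerate t)).getD (PySem.List.pyGetD m k 0) [])
          else out ++ [((some k : Option Int), (none : Option Int))]
        else out)
      = fun out k => out ++ pvGB m t k := by
    funext out k
    unfold pvGB pvTidx
    split_ifs <;> simp
  rw [hb, PySem.List.foldl_append_eq_flatMap, List.nil_append]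

theorem htidx (t : List Int) (v : Int) :
    (pvTidx t).getD v []
      = (PySem.List.pyRange 0 (t.length : Int) 1).filter
          (fun j => decide (PySem.List.pyGetD t j 0 = v)) := by
  unfold pvTidx
  rw [tidx_getD, PySem.List.enumerate_eq_map_pyRange (d := 0)]
  simp [List.filter_map, List.map_map, Function.comp_def]

-- the first components present in pvM: exactly the in-range i with m[i] occurring in t
theorem mem_fst_pvM (m t : List Int) (i : Int) :
    some i ∈ (pvM m t).map Prod.fst
      ↔ (0 ≤ i ∧ i < (m.length : Int)) ∧ PySem.List.pyGetD m i 0 ∈ t := by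
  unfold pvM
  rw [show (PySem.List.pyGetD m i 0 ∈ t) ↔ _ from mem_iff_pyIdx t (PySem.List.pyGetD m i 0)]
  simp only [List.map_flatMap, List.map_map, Function.comp_def, List.mem_flatMap,
    List.mem_map, List.mem_filter, PySem.List.mem_pyRange_one, Option.some.injEq,
    decide_eq_true_eq]
  constructor
  · rintro ⟨i', hi', j, ⟨hjb, heq⟩, rfl⟩
    exact ⟨hi', j, hjb, heq.symm⟩
  · rintro ⟨hi, j, hjb, heq⟩
    exact ⟨i, hi, j, ⟨hjb, heq.symm⟩, rfl⟩

-- the second components present in pvM ++ pvD: exactly the in-range j with t[j] occurring in m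
theorem mem_snd_pvMD (m t : List Int) (j : Int) :
    some j ∈ (pvM m t ++ pvD m t).map Prod.snd
      ↔ (0 ≤ j ∧ j < (t.length : Int)) ∧ PySem.List.pyGetD t j 0 ∈ m := by
  unfold pvM pvD
  rw [List.map_append, List.mem_append,
      show (PySem.List.pyGetD t j 0 ∈ m) ↔ _ from mem_iff_pyIdx m (PySem.List.pyGetD t j 0)]
  simp only [List.map_flatMap, List.map_map, Function.comp_def, List.mem_flatMap,
    List.mem_map, List.mem_filter, PySem.List.mem_pyRange_one, Option.some.injEq,
    decide_eq_true_eq, reduceCtorEq, and_false, exists_false, or_false]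
  constructor
  · rintro ⟨i', hi', j', ⟨hjb, heq⟩, rfl⟩
    exact ⟨hjb, i', hi', heq⟩
  · rintro ⟨hjb, i', hi', heq⟩
    exact ⟨i', hi', j, ⟨hjb, heq⟩, rfl⟩

-- the fiber of key k in A's pre-sort list equals B's per-index emission
theorem fiber_eq (m t : List Int) (k : Int) (hk : 0 ≤ k) :
    pvG (pvM m t ++ pvD m t ++ pvI m t) k = pvGB m t k := by
  unfold pvG
  rw [List.append_assoc, List.filter_append, List.filter_append]
  have hM : (pvM m t).filter (fun p => decide (pvKey p = k)) =
      if k < (m.length : Int) then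
        ((PySem.List.pyRange 0 (t.length : Int) 1).filter
          (fun j => decide (PySem.List.pyGetD m k 0 = PySem.List.pyGetD t j 0))).map
          (fun j => ((some k : Option Int), (some j : Option Int)))
      else [] := by
    unfold pvM
    rw [List.filter_flatMap]
    have hfun : (fun i => List.filter (fun p => decide (pvKey p = k))
        (((PySem.List.pyRange 0 (t.length : Int) 1).filter
          (fun j => decide (PySem.List.pyGetD m i 0 = PySem.List.pyGetD t j 0))).map
          (fun j => ((some i : Option Int), (some j : Option Int)))))
        = fun i => if i = k then
            ((PySem.List.pyRange 0 (t.length : Int) 1).filter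
              (fun j => decide (PySem.List.pyGetD m i 0 = PySem.List.pyGetD t j 0))).map
              (fun j => ((some i : Option Int), (some j : Option Int)))
          else [] := by
      funext i
      by_cases hik : i = k <;> simp [List.filter_map, Function.comp_def, pvKey, hik]
    rw [hfun, flatMap_ite_single _ (PySem.List.nodup_pyRange_one 0 (m.length : Int)) k]
    simp only [PySem.List.mem_pyRange_one]
    by_cases hkn : k < (m.length : Int) <;> simp [hk, hkn]
  have hD : (pvD m t).filter (fun p => decide (pvKey p = k)) =
      if k < (m.length : Int) ∧ (some k) ∉ (pvM m t).map Prod.fst then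
        [((some k : Option Int), (none : Option Int))]
      else [] := by
    conv_lhs => rw [pvD]
    rw [List.filter_map]
    have hcomp : ((fun p => decide (pvKey p = k)) ∘
        (fun i => ((some i : Option Int), (none : Option Int)))) = fun i => decide (i = k) := by
      funext i
      simp [pvKey]
    rw [hcomp, filter_eq_of_nodup _
      (List.Nodup.filter _ (PySem.List.nodup_pyRange_one 0 (m.length : Int))) k,
      apply_ite (List.map (fun i => ((some i : Option Int), (none : Option Int))))]
    simp only [List.mem_filter, PySem.List.mem_pyRange_one, decide_eq_true_eq, List.map_cons,
      List.map_nil]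
    by_cases h1 : k < (m.length : Int) <;> by_cases h2 : (some k) ∈ (pvM m t).map Prod.fst <;>
      first
      | rfl
      | simp [hk, h1, h2]
  have hI : (pvI m t).filter (fun p => decide (pvKey p = k)) =
      if k < (t.length : Int) ∧ (some k) ∉ (pvM m t ++ pvD m t).map Prod.snd then
        [((none : Option Int), (some k : Option Int))]
      else [] := by
    conv_lhs => rw [pvI]
    rw [List.filter_map]
    have hcomp : ((fun p => decide (pvKey p = k)) ∘
        (fun j => ((none : Option Int), (some j : Option Int)))) = fun j => decide (j = k) := by
      funext j
      simp [pvKey]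
    rw [hcomp, filter_eq_of_nodup _
      (List.Nodup.filter _ (PySem.List.nodup_pyRange_one 0 (t.length : Int))) k,
      apply_ite (List.map (fun j => ((none : Option Int), (some j : Option Int))))]
    simp only [List.mem_filter, PySem.List.mem_pyRange_one, decide_eq_true_eq, List.map_cons,
      List.map_nil]
    have hiff : ((0 ≤ k ∧ k < (t.length : Int)) ∧ some k ∉ (pvM m t ++ pvD m t).map Prod.snd)
        ↔ (k < (t.length : Int) ∧ some k ∉ (pvM m t ++ pvD m t).map Prod.snd) := by
      constructor
      · rintro ⟨⟨_, h⟩, h'⟩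
        exact ⟨h, h'⟩
      · rintro ⟨h, h'⟩
        exact ⟨⟨hk, h⟩, h'⟩
    rw [if_congr hiff rfl rfl]
  rw [hM, hD, hI]
  unfold pvGB
  rw [htidx, contains_ofList_eq_decide, contains_ofList_eq_decide]
  have hflip : (PySem.List.pyRange 0 (t.length : Int) 1).filter
        (fun j => decide (PySem.List.pyGetD t j 0 = PySem.List.pyGetD m k 0))
      = (PySem.List.pyRange 0 (t.length : Int) 1).filter
        (fun j => decide (PySem.List.pyGetD m k 0 = PySem.List.pyGetD t j 0)) := by
    apply List.filter_congr
    intro j _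
    exact decide_eq_decide.mpr eq_comm
  rw [hflip]
  simp only [mem_fst_pvM, mem_snd_pvMD]
  have hempty : PySem.List.pyGetD m k 0 ∉ t →
      (PySem.List.pyRange 0 (t.length : Int) 1).filter
        (fun j => decide (PySem.List.pyGetD m k 0 = PySem.List.pyGetD t j 0)) = [] := by
    intro hmt
    rw [List.filter_eq_nil_iff]
    intro j hj
    rw [PySem.List.mem_pyRange_one] at hj
    simp only [decide_eq_true_eq]
    intro he
    exact hmt ((mem_iff_pyIdx t _).mpr ⟨j, hj, he.symm⟩)
  by_cases hkn : k < (m.length : Int) <;>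
    by_cases hmt : PySem.List.pyGetD m k 0 ∈ t <;>
    by_cases hkt : k < (t.length : Int) <;>
    by_cases htm : PySem.List.pyGetD t k 0 ∈ m <;>
    simp [hk, hkn, hmt, hkt, htm, hempty]

-- every key of A's pre-sort list lies in [0, max(len(m), len(t)))
theorem keys_in_range (m t : List Int) :
    ∀ p ∈ pvM m t ++ pvD m t ++ pvI m t,
      pvKey p ∈ PySem.List.pyRange 0 (max (m.length : Int) (t.length : Int)) 1 := by
  intro p hp
  rw [PySem.List.mem_pyRange_one]
  rcases List.mem_append.mp hp with hp' | hpI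
  · rcases List.mem_append.mp hp' with hpM | hpD
    · unfold pvM at hpM
      rcases List.mem_flatMap.mp hpM with ⟨i, hi, hp''⟩
      rcases List.mem_map.mp hp'' with ⟨j, _, rfl⟩
      rw [PySem.List.mem_pyRange_one] at hi
      have : pvKey (some i, some j) = i := rfl
      rw [this]
      omega
    · unfold pvD at hpD
      rcases List.mem_map.mp hpD with ⟨i, hi, rfl⟩
      have hi' := (List.mem_filter.mp hi).1
      rw [PySem.List.mem_pyRange_one] at hi'
      have : pvKey (some i, none) = i := rfl
      rw [this]
      omega
  · unfold pvI at hpI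
    rcases List.mem_map.mp hpI with ⟨j, hj, rfl⟩
    have hj' := (List.mem_filter.mp hj).1
    rw [PySem.List.mem_pyRange_one] at hj'
    have : pvKey (none, some j) = j := rfl
    rw [this]
    omega

-- ===== VERDICT (by name: the statement is the Claim_ definition above) =====
theorem generate_true_matching_spec : Claim_equal_generate_true_matching := by
  intro m t _
  unfold Spec_generate_true_matching
  rw [a_presort,
      sorted_eq_flatMap_groups (PySem.List.pyRange 0 (max (m.length : Int) (t.length : Int)) 1)
        (PySem.List.pairwise_lt_pyRange_one 0 _) _ (keys_in_range m t),
      b_flatMap]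
  apply List.flatMap_congr
  intro k hk
  rw [PySem.List.mem_pyRange_one] at hk
  exact fiber_eq m t k hk.1
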